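-- pv_equiv track=rewrite | github.com/moonshot-cyber/agent-health-monitor | monitor.py | _calc_repeated_failure_score
-- ===== SOURCE A (Python) =====
-- def _calc_repeated_failure_score(transactions: list[dict]) -> tuple[int, int, bool]:
--     """Repeated failure patterns. Returns (score, max_consecutive, has_recovery)."""
--     groups: dict[str, list[dict]] = {}
--     for tx in transactions:
--         to_addr = (tx.get("to") or "").lower()
--         inp = tx.get("input", "0x")
--         method_id = inp[:10] if len(inp) >= 10 else "0x"
--         key = f"{to_addr}:{method_id}"
--         groups.setdefault(key, []).append(tx)
--
--     max_consec = 0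
--     has_recovery = False
--
--     for key, txs in groups.items():
--         sorted_txs = sorted(txs, key=lambda t: int(t.get("timeStamp", 0)))
--         consecutive = 0
--         group_max = 0
--         seen_failure = False
--
--         for tx in sorted_txs:
--             is_error = tx.get("isError") == "1" or tx.get("txreceipt_status") == "0"
--             if is_error:
--                 consecutive += 1
--                 seen_failure = True
--                 group_max = max(group_max, consecutive)
--             else:
--                 if seen_failure and consecutive > 0:
--                     has_recovery = True
--                 consecutive = 0
--
--         max_consec = max(max_consec, group_max)
--
--     if max_consec <= 2:
--         score = 100
--     elif max_consec <= 5: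
--         score = 80 - (max_consec - 2) * 10
--     elif max_consec <= 10:
--         score = 50 - (max_consec - 5) * 8
--     else:
--         score = 0
--
--     if has_recovery and score < 80:
--         score = min(80, score + 15)
--
--     return max(0, score), max_consec, has_recovery
-- ===== SOURCE B (Python) =====
-- def _calc_repeated_failure_score(transactions):
--     """Repeated failure patterns. Returns (score, max_consecutive, has_recovery)."""
--     def key_of(tx):
--         to_addr = (tx.get("to") or "").lower()
--         inp = tx.get("input", "0x")
--         method_id = inp[:10] if len(inp) >= 10 else "0x"
--         return f"{to_addr}:{method_id}"
--
--     def is_error(tx):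
--         return tx.get("isError") == "1" or tx.get("txreceipt_status") == "0"
--
--     def ts(tx):
--         return int(tx.get("timeStamp", 0))
--
--     max_consec = 0
--     has_recovery = False
--     seen = set()
--     for tx in transactions:
--         k = key_of(tx)
--         if k in seen:
--             continue
--         seen.add(k)
--         flags = [is_error(t) for t in sorted((t for t in transactions if key_of(t) == k), key=ts)]
--         # run-length decomposition of the error flags of this group
--         runs = []
--         for f in flags:
--             if runs and runs[-1][0] == f:
--                 runs[-1] = (f, runs[-1][1] + 1)
--             else:
--                 runs.append((f, 1))
--         for e, n in runs:
--             if e and n > max_consec: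
--                 max_consec = n
--         has_recovery = has_recovery or any(e for e, _ in runs[:-1])
--
--     if max_consec <= 2:
--         score = 100
--     elif max_consec <= 5:
--         score = 100 - 10 * max_consec
--     elif max_consec <= 10:
--         score = 90 - 8 * max_consec
--     else:
--         score = 0
--     if has_recovery and score < 80:
--         score = min(80, score + 15)
--     return score, max_consec, has_recovery
-- ===== Notes on version B (the rewrite author's own statement) =====
-- stated objective: simpler
-- what changed: B drops A's dict-of-lists grouping in favour of a first-occurrence seen-set with a per-key filter, and replaces A's stateful consecutive/seen_failure counter scan by a run-length decomposition of the error flags (max_consec = longest error run, recovery = any error run that is not the last run); the score ladder is written in expanded closed form and the redundant max(0, score) is dropped.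
import Mathlib
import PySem

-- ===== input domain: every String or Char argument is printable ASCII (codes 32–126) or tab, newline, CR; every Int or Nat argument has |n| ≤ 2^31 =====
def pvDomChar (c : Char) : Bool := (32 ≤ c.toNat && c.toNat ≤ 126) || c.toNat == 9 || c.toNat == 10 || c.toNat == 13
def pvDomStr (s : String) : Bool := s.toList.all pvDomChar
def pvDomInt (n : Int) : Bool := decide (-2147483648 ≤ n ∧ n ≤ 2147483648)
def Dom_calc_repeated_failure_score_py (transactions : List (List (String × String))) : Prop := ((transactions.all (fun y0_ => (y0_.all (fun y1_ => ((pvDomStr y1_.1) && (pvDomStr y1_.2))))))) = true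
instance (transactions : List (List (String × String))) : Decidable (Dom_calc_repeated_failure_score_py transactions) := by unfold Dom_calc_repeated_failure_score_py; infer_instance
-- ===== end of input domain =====

-- B is simpler/idiomatic: no dict-of-lists — a seen-set over first-occurrence keys with a per-key
-- filter, and the inner error scan replaced by a run-length decomposition of the error flags.

-- ===== PORT A =====
-- A's sort key int(t.get("timeStamp", 0)); total only under Pre_ (ofStr? = some), getD 0 is unreachable there
def pvTsA (t : List (String × String)) : Int :=
  match (PySem.Dict.mk t).get? "timeStamp" with
  | none => 0
  | some s => (PySem.Int.ofStr? s).getD 0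

def calc_repeated_failure_score_py (transactions : List (List (String × String))) : Int × Int × Bool :=
  -- groups: dict key -> list of txs, built by setdefault(key, []).append(tx)
  let groups : PySem.Dict (List Char) (List (List (String × String))) :=
    transactions.foldl (fun g tx =>
      let to_addr := PySem.Chars.lower (((PySem.Dict.mk tx).get? "to").getD "").toList
      let inp := ((PySem.Dict.mk tx).get? "input").getD "0x"
      let method_id := if 10 ≤ (PySem.Str.len inp) then PySem.List.slice inp.toList none (some 10) else ['0', 'x']
      let key := to_addr ++ [':'] ++ method_id
      g.modify key [] (fun l => l ++ [tx])) PySem.Dict.empty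
  -- for key, txs in groups.items(): scan the time-sorted txs with (consecutive, group_max, seen_failure)
  let st : Int × Bool :=
    groups.items.foldl (fun st kv =>
      let sorted_txs := PySem.List.sorted kv.2 pvTsA false
      let inner : Int × Int × Bool × Bool :=
        sorted_txs.foldl (fun s tx =>
          let is_error := ((PySem.Dict.mk tx).get? "isError" == some "1") ||
                          ((PySem.Dict.mk tx).get? "txreceipt_status" == some "0")
          if is_error then (s.1 + 1, max s.2.1 (s.1 + 1), true, s.2.2.2)
          else (0, s.2.1, s.2.2.1, s.2.2.2 || (s.2.2.1 && decide (0 < s.1))))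
        (0, 0, false, st.2)
      (max st.1 inner.2.1, inner.2.2.2)) (0, false)
  let max_consec := st.1
  let has_recovery := st.2
  let score : Int :=
    if max_consec ≤ 2 then 100
    else if max_consec ≤ 5 then 80 - (max_consec - 2) * 10
    else if max_consec ≤ 10 then 50 - (max_consec - 5) * 8
    else 0
  let score := if has_recovery && decide (score < 80) then min 80 (score + 15) else score
  (max 0 score, max_consec, has_recovery)

-- ===== PORT B =====
-- key_of(tx) = f"{(tx.get('to') or '').lower()}:{method_id}" as a char list
def pvKeyOf (tx : List (String × String)) : List Char :=
  let to_addr := PySem.Chars.lower (((PySem.Dict.mk tx).get? "to").getD "").toList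
  let inp := ((PySem.Dict.mk tx).get? "input").getD "0x"
  let method_id := if 10 ≤ (PySem.Str.len inp) then PySem.List.slice inp.toList none (some 10) else ['0', 'x']
  to_addr ++ [':'] ++ method_id

def pvIsErr (tx : List (String × String)) : Bool :=
  ((PySem.Dict.mk tx).get? "isError" == some "1") ||
  ((PySem.Dict.mk tx).get? "txreceipt_status" == some "0")

-- run-length decomposition: runs[-1] merged or a new (f, 1) appended
def pvRuns (flags : List Bool) : List (Bool × Int) :=
  flags.foldl (fun runs f =>
    match runs.getLast? with
    | some (e, n) => if e == f then runs.dropLast ++ [(f, n + 1)] else runs ++ [(f, 1)]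
    | none => runs ++ [(f, 1)]) []

def calc_repeated_failure_score_py_alt (transactions : List (List (String × String))) : Int × Int × Bool :=
  let st : PySem.Set (List Char) × Int × Bool :=
    transactions.foldl (fun st tx =>
      let k := pvKeyOf tx
      if PySem.Set.contains st.1 k then st
      else
        let flags := (PySem.List.sorted (transactions.filter (fun t => pvKeyOf t == k)) pvTsA false).map pvIsErr
        let runs := pvRuns flags
        let mc := runs.foldl (fun m en => if en.1 && decide (m < en.2) then en.2 else m) st.2.1
        let hr := st.2.2 || runs.dropLast.any (fun en => en.1)
        (PySem.Set.add st.1 k, mc, hr)) (PySem.Set.empty, 0, false)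
  let max_consec := st.2.1
  let has_recovery := st.2.2
  let score : Int :=
    if max_consec ≤ 2 then 100
    else if max_consec ≤ 5 then 100 - 10 * max_consec
    else if max_consec ≤ 10 then 90 - 8 * max_consec
    else 0
  let score := if has_recovery && decide (score < 80) then min 80 (score + 15) else score
  (score, max_consec, has_recovery)

-- ===== PRECONDITION & SPEC =====
-- Pre_ excludes exactly the inputs where int(tx["timeStamp"]) raises ValueError (both A and B raise there)
def Pre_calc_repeated_failure_score_py (transactions : List (List (String × String))) : Prop :=
  ∀ tx ∈ transactions, ∀ s, (PySem.Dict.mk tx).get? "timeStamp" = some s → (PySem.Int.ofStr? s).isSome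
instance (transactions : List (List (String × String))) : Decidable (Pre_calc_repeated_failure_score_py transactions) := by unfold Pre_calc_repeated_failure_score_py; infer_instance

def pvWitness_calc_repeated_failure_score_py : (List (List (String × String))) :=
  [[("to", "0xAbC"), ("timeStamp", "2"), ("isError", "1")],
   [("to", "0xabc"), ("timeStamp", "1"), ("isError", "1")],
   [("to", "0xabc"), ("timeStamp", "3"), ("isError", "0")]]

def Spec_calc_repeated_failure_score_py (transactions : List (List (String × String))) (out : Int × Int × Bool) : Prop := out = calc_repeated_failure_score_py_alt transactions
instance (transactions : List (List (String × String))) (out : Int × Int × Bool) : Decidable (Spec_calc_repeated_failure_score_py transactions out) := by unfold Spec_calc_repeated_failure_score_py; infer_instance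

-- ===== CLAIM (what is proved, stated in full; the proofs are below) =====
def Claim_equal_calc_repeated_failure_score_py : Prop := ∀ (transactions : List (List (String × String))), Dom_calc_repeated_failure_score_py transactions → Pre_calc_repeated_failure_score_py transactions → Spec_calc_repeated_failure_score_py transactions (calc_repeated_failure_score_py transactions)

-- ===== LEMMAS AND PROOFS =====

-- ---- proof-side abbreviations ----
def pvGroup (transactions : List (List (String × String))) (k : List Char) : List (List (String × String)) :=
  transactions.filter (fun t => pvKeyOf t == k)

-- A's inner scan step, on the error flag
def pvAStep (s : Int × Int × Bool × Bool) (f : Bool) : Int × Int × Bool × Bool :=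
  if f then (s.1 + 1, max s.2.1 (s.1 + 1), true, s.2.2.2)
  else (0, s.2.1, s.2.2.1, s.2.2.2 || (s.2.2.1 && decide (0 < s.1)))

def pvLastTrue (R : List (Bool × Int)) : Int :=
  match R.getLast? with
  | some (true, n) => n
  | _ => 0

def pvMaxErr (R : List (Bool × Int)) : Int :=
  R.foldl (fun m en => if en.1 then max m en.2 else m) 0

-- A's per-key outer step (shape of A's loop body after grouping)
def pvStepA (transactions : List (List (String × String))) (st : Int × Bool) (k : List Char) : Int × Bool :=
  (max st.1 (((PySem.List.sorted (pvGroup transactions k) pvTsA false).foldl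
      (fun s tx => pvAStep s (pvIsErr tx)) (0, 0, false, st.2)).2.1),
   ((PySem.List.sorted (pvGroup transactions k) pvTsA false).foldl
      (fun s tx => pvAStep s (pvIsErr tx)) (0, 0, false, st.2)).2.2.2)

-- B's per-key step (shape of B's loop body on a fresh key)
def pvStepB (transactions : List (List (String × String))) (st : Int × Bool) (k : List Char) : Int × Bool :=
  ((pvRuns ((PySem.List.sorted (transactions.filter (fun t => pvKeyOf t == k)) pvTsA false).map pvIsErr)).foldl
      (fun m en => if en.1 && decide (m < en.2) then en.2 else m) st.1,
   st.2 || (pvRuns ((PySem.List.sorted (transactions.filter (fun t => pvKeyOf t == k)) pvTsA false).map pvIsErr)).dropLast.any (fun en => en.1))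

-- ---- run-length lemmas ----
theorem pvRuns_concat (flags : List Bool) (f : Bool) :
    pvRuns (flags ++ [f]) =
      match (pvRuns flags).getLast? with
      | some (e, n) => if e == f then (pvRuns flags).dropLast ++ [(f, n + 1)] else pvRuns flags ++ [(f, 1)]
      | none => pvRuns flags ++ [(f, 1)] := by
  simp [pvRuns, List.foldl_append]

theorem pvRuns_pos (flags : List Bool) : ∀ en ∈ pvRuns flags, 1 ≤ en.2 := by
  induction flags using List.reverseRecOn with
  | nil => simp [pvRuns]
  | append_singleton fs f ih =>
    rw [pvRuns_concat]
    rcases h : (pvRuns fs).getLast? with _ | ⟨e, n⟩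
    · intro en hen
      rcases List.mem_append.1 hen with h' | h'
      · exact ih en h'
      · simp at h'; simp [h']
    · have hn : 1 ≤ n := ih (e, n) (List.mem_of_getLast? h)
      by_cases hef : e == f
      · simp only [hef]
        intro en hen
        rcases List.mem_append.1 hen with h' | h'
        · exact ih en (List.dropLast_sublist _ |>.mem h')
        · simp at h'; simp [h']; omega
      · simp only [hef]
        intro en hen
        rcases List.mem_append.1 hen with h' | h'
        · exact ih en h'
        · simp at h'; simp [h']

theorem pvScan_runs (flags : List Bool) (hr0 : Bool) :
    flags.foldl pvAStep (0, 0, false, hr0) =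
      (pvLastTrue (pvRuns flags), pvMaxErr (pvRuns flags),
       (pvRuns flags).any (fun en => en.1), hr0 || (pvRuns flags).dropLast.any (fun en => en.1)) := by
  induction flags using List.reverseRecOn with
  | nil => simp [pvRuns, pvLastTrue, pvMaxErr]
  | append_singleton fs f ih =>
    have hpos := pvRuns_pos fs
    rw [List.foldl_append, ih, pvRuns_concat]
    rcases hL : (pvRuns fs).getLast? with _ | ⟨e, n⟩
    · -- pvRuns fs = []
      have hnil : pvRuns fs = [] := List.getLast?_eq_none_iff.1 hL
      cases f <;> simp [hnil, pvAStep, pvLastTrue, pvMaxErr]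
    · obtain ⟨L, hR⟩ : ∃ L, pvRuns fs = L ++ [(e, n)] := by
        rcases List.eq_nil_or_concat (pvRuns fs) with h | ⟨L, b, h⟩
        · rw [h] at hL; simp at hL
        · rw [h] at hL; simp at hL; exact ⟨L, by rw [h, hL, List.concat_eq_append]⟩
      have hn : 1 ≤ n := hpos (e, n) (List.mem_of_getLast? hL)
      rw [hR]
      cases e <;> cases f <;>
        simp [pvAStep, pvLastTrue, pvMaxErr, List.foldl_append, List.any_append]
      exact Or.inr (by omega)

theorem pvMaxFold (R : List (Bool × Int)) : ∀ (a b : Int),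
    R.foldl (fun m en => if en.1 then max m en.2 else m) (max a b) =
      max a (R.foldl (fun m en => if en.1 then max m en.2 else m) b) := by
  induction R with
  | nil => intro a b; rfl
  | cons en R ih =>
    intro a b
    rcases en with ⟨e, n⟩
    cases e
    · simp only [List.foldl_cons, Bool.false_eq_true, if_false]
      exact ih a b
    · simp only [List.foldl_cons, if_true]
      rw [max_assoc, ih]

theorem pvCondMax (R : List (Bool × Int)) (mc : Int) :
    R.foldl (fun m en => if en.1 && decide (m < en.2) then en.2 else m) mc =
      R.foldl (fun m en => if en.1 then max m en.2 else m) mc := by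
  induction R generalizing mc with
  | nil => rfl
  | cons en R ih =>
    rcases en with ⟨e, n⟩
    cases e
    · simp only [List.foldl_cons, Bool.false_and, Bool.false_eq_true, if_false]
      exact ih mc
    · simp only [List.foldl_cons, Bool.true_and, if_true]
      rw [ih]
      congr 1
      by_cases h : mc < n
      · simp [h, max_eq_right (le_of_lt h)]
      · simp [h, max_eq_left (le_of_not_gt h)]

theorem pvMaxErr_fold (R : List (Bool × Int)) (mc : Int) (h : 0 ≤ mc) :
    R.foldl (fun m en => if en.1 && decide (m < en.2) then en.2 else m) mc = max mc (pvMaxErr R) := by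
  rw [pvCondMax, pvMaxErr, ← pvMaxFold R mc 0]
  congr 1
  omega

theorem pvStep_eq (transactions : List (List (String × String))) (st : Int × Bool) (k : List Char)
    (h : 0 ≤ st.1) : pvStepA transactions st k = pvStepB transactions st k := by
  unfold pvStepA pvStepB pvGroup
  rw [show ∀ l : List (List (String × String)), l.foldl (fun s tx => pvAStep s (pvIsErr tx)) (0, 0, false, st.2)
        = (l.map pvIsErr).foldl pvAStep (0, 0, false, st.2) from fun l => (List.foldl_map ..).symm,
      pvScan_runs, pvMaxErr_fold _ _ h]

theorem pvOuter_eq (transactions : List (List (String × String))) (K : List (List Char))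
    (st : Int × Bool) (h : 0 ≤ st.1) :
    K.foldl (pvStepA transactions) st = K.foldl (pvStepB transactions) st := by
  induction K generalizing st with
  | nil => rfl
  | cons k K ih =>
    rw [List.foldl_cons, List.foldl_cons, pvStep_eq transactions st k h, ih]
    have : 0 ≤ (pvStepA transactions st k).1 := by
      unfold pvStepA
      exact le_trans h (le_max_left _ _)
    rw [← pvStep_eq transactions st k h] at *
    exact this

-- ---- grouping lemma: A's dict items = first-occurrence keys with their filtered groups ----
theorem pvItems_eq (transactions : List (List (String × String))) :
    (transactions.foldl (fun g tx => g.modify (pvKeyOf tx) [] (fun l => l ++ [tx]))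
        (PySem.Dict.empty : PySem.Dict (List Char) (List (List (String × String))))).items =
      (PySem.Set.ofList (transactions.map pvKeyOf)).map (fun k => (k, pvGroup transactions k)) := by
  have hkeys : (transactions.foldl (fun g tx => g.modify (pvKeyOf tx) [] (fun l => l ++ [tx]))
      (PySem.Dict.empty : PySem.Dict (List Char) (List (List (String × String))))).keys
      = PySem.Set.ofList (transactions.map pvKeyOf) := by
    rw [PySem.Dict.keys_foldl_modify_key transactions pvKeyOf []
          (fun _ tx => fun l => l ++ [tx]) PySem.Dict.empty]
    exact PySem.Set.update_nil_left _
  have hnodup := PySem.Dict.nodup_keys_foldl_modify_key transactions pvKeyOf []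
      (fun _ tx => fun l => l ++ [tx])
      (PySem.Dict.empty : PySem.Dict (List Char) (List (List (String × String)))) (by simp)
  have hget : ∀ k, (transactions.foldl (fun g tx => g.modify (pvKeyOf tx) [] (fun l => l ++ [tx]))
      (PySem.Dict.empty : PySem.Dict (List Char) (List (List (String × String))))).getD k []
      = pvGroup transactions k := by
    intro k
    have h1 : (transactions.foldl (fun g tx => g.modify (pvKeyOf tx) [] (fun l => l ++ [tx]))
        (PySem.Dict.empty : PySem.Dict (List Char) (List (List (String × String)))))
        = (transactions.map (fun tx => (pvKeyOf tx, tx))).foldl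
            (fun d p => d.modify p.1 [] (fun l => l ++ [p.2])) PySem.Dict.empty := by
      rw [List.foldl_map]
    rw [h1, PySem.Dict.getD_foldl_modify_append]
    simp [pvGroup, List.filter_map, Function.comp_def]
  rw [PySem.Dict.items_eq_map_keys _ hnodup [], hkeys]
  exact List.map_congr_left (fun k _ => by rw [hget k])

-- ---- B's seen-set loop = a fold over the distinct keys ----
theorem pvSeen_fold (g : (Int × Bool) → List Char → Int × Bool)
    (l : List (List (String × String))) (seen : PySem.Set (List Char)) (acc : Int × Bool) :
    l.foldl (fun st tx =>
        if PySem.Set.contains st.1 (pvKeyOf tx) then st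
        else (PySem.Set.add st.1 (pvKeyOf tx), g st.2 (pvKeyOf tx))) (seen, acc) =
      (PySem.Set.update seen (l.map pvKeyOf),
       ((PySem.Set.ofList (l.map pvKeyOf)).filter
          (fun k => !(PySem.Set.contains seen k))).foldl g acc) := by
  induction l generalizing seen acc with
  | nil => simp [PySem.Set.update_nil, PySem.Set.ofList]
  | cons x l ih =>
    simp only [List.map_cons, List.foldl_cons, PySem.Set.update_cons, PySem.Set.ofList_cons]
    by_cases hc : PySem.Set.contains seen (pvKeyOf x) = true
    · rw [if_pos hc, ih seen acc,
        PySem.Set.add_of_mem ((PySem.Set.contains_iff seen (pvKeyOf x)).1 hc)]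
      congr 1
      rw [List.filter_cons_of_neg (by simp only [hc, Bool.not_true]; exact Bool.false_ne_true),
        PySem.Set.discard, List.filter_filter]
      congr 1
      apply List.filter_congr
      intro y _
      by_cases hy : y = pvKeyOf x
      · subst hy
        have := (PySem.Set.contains_iff seen (pvKeyOf x)).1 hc
        simp [this]
      · simp [hy]
    · rw [if_neg hc, ih (PySem.Set.add seen (pvKeyOf x)) (g acc (pvKeyOf x))]
      congr 1
      rw [List.filter_cons_of_pos (by simp only [eq_false_of_ne_true hc, Bool.not_false]), List.foldl_cons]
      congr 1
      rw [PySem.Set.discard, List.filter_filter]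
      apply List.filter_congr
      intro y _
      by_cases hy : y = pvKeyOf x
      · subst hy
        simp [PySem.Set.mem_add]
      · simp [hy]

-- ---- the scoring ladder agrees (and max 0 is the identity on it) ----
theorem pvScore_eq (m : Int) (h : Bool) :
    (max 0 (if h && decide ((if m ≤ 2 then (100:Int) else if m ≤ 5 then 80 - (m - 2) * 10 else if m ≤ 10 then 50 - (m - 5) * 8 else 0) < 80)
        then min 80 ((if m ≤ 2 then (100:Int) else if m ≤ 5 then 80 - (m - 2) * 10 else if m ≤ 10 then 50 - (m - 5) * 8 else 0) + 15)
        else (if m ≤ 2 then (100:Int) else if m ≤ 5 then 80 - (m - 2) * 10 else if m ≤ 10 then 50 - (m - 5) * 8 else 0))) =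
    (if h && decide ((if m ≤ 2 then (100:Int) else if m ≤ 5 then 100 - 10 * m else if m ≤ 10 then 90 - 8 * m else 0) < 80)
        then min 80 ((if m ≤ 2 then (100:Int) else if m ≤ 5 then 100 - 10 * m else if m ≤ 10 then 90 - 8 * m else 0) + 15)
        else (if m ≤ 2 then (100:Int) else if m ≤ 5 then 100 - 10 * m else if m ≤ 10 then 90 - 8 * m else 0)) := by
  have h1 : (80 : Int) - (m - 2) * 10 = 100 - 10 * m := by ring
  have h2 : (50 : Int) - (m - 5) * 8 = 90 - 8 * m := by ring
  rw [h1, h2]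
  split_ifs <;> simp_all <;> omega


def pvFinalA (st : Int × Bool) : Int × Int × Bool :=
  let score : Int := if st.1 ≤ 2 then 100 else if st.1 ≤ 5 then 80 - (st.1 - 2) * 10
    else if st.1 ≤ 10 then 50 - (st.1 - 5) * 8 else 0
  let score := if st.2 && decide (score < 80) then min 80 (score + 15) else score
  (max 0 score, st.1, st.2)

def pvFinalB (st : Int × Bool) : Int × Int × Bool :=
  let score : Int := if st.1 ≤ 2 then 100 else if st.1 ≤ 5 then 100 - 10 * st.1
    else if st.1 ≤ 10 then 90 - 8 * st.1 else 0
  let score := if st.2 && decide (score < 80) then min 80 (score + 15) else score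
  (score, st.1, st.2)

theorem pvFinal_eq (st : Int × Bool) : pvFinalA st = pvFinalB st := by
  rcases st with ⟨m, h⟩
  unfold pvFinalA pvFinalB
  simp only
  rw [pvScore_eq m h]

-- ===== VERDICT (by name: the statement is the Claim_ definition above) =====
theorem calc_repeated_failure_score_py_spec : Claim_equal_calc_repeated_failure_score_py := by
  intro transactions _hdom _hpre
  show calc_repeated_failure_score_py transactions = calc_repeated_failure_score_py_alt transactions
  have hA : calc_repeated_failure_score_py transactions
      = pvFinalA ((transactions.foldl (fun g tx => g.modify (pvKeyOf tx) [] (fun l => l ++ [tx]))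
          (PySem.Dict.empty : PySem.Dict (List Char) (List (List (String × String))))).items.foldl
            (fun st kv =>
              (max st.1 (((PySem.List.sorted kv.2 pvTsA false).foldl
                  (fun s tx => pvAStep s (pvIsErr tx)) (0, 0, false, st.2)).2.1),
               ((PySem.List.sorted kv.2 pvTsA false).foldl
                  (fun s tx => pvAStep s (pvIsErr tx)) (0, 0, false, st.2)).2.2.2)) (0, false)) := rfl
  have hB : calc_repeated_failure_score_py_alt transactions
      = pvFinalB ((transactions.foldl (fun st tx =>
            if PySem.Set.contains st.1 (pvKeyOf tx) then st
            else (PySem.Set.add st.1 (pvKeyOf tx), pvStepB transactions st.2 (pvKeyOf tx)))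
          ((PySem.Set.empty : PySem.Set (List Char)), ((0 : Int), false))).2) := rfl
  rw [hA, hB, pvItems_eq, List.foldl_map,
    pvSeen_fold (pvStepB transactions) transactions PySem.Set.empty (0, false)]
  have hfilt : ((PySem.Set.ofList (transactions.map pvKeyOf)).filter
      (fun k => !(PySem.Set.contains (PySem.Set.empty : PySem.Set (List Char)) k)))
      = PySem.Set.ofList (transactions.map pvKeyOf) := by
    simp [PySem.Set.contains, PySem.Set.empty]
  rw [hfilt]
  have hsteps : (PySem.Set.ofList (transactions.map pvKeyOf)).foldl
      (fun x y => (fun st kv =>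
        (max st.1 (((PySem.List.sorted kv.2 pvTsA false).foldl
            (fun s tx => pvAStep s (pvIsErr tx)) (0, 0, false, st.2)).2.1),
         ((PySem.List.sorted kv.2 pvTsA false).foldl
            (fun s tx => pvAStep s (pvIsErr tx)) (0, 0, false, st.2)).2.2.2)) x
        ((fun k => (k, pvGroup transactions k)) y)) (0, false)
      = (PySem.Set.ofList (transactions.map pvKeyOf)).foldl (pvStepA transactions) (0, false) := rfl
  rw [hsteps, pvOuter_eq transactions _ (0, false) (by norm_num)]
  exact pvFinal_eq _
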